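-- pv_equiv track=rewrite | github.com/corscheid/hexstr | hexstr.py | hexstr
-- ===== SOURCE A (Python) =====
-- def hexstr(s):
--     """
--     Get little endian hex words represenation of string
--     Very similar to x/x in GDB when debugging a C program
--
--     :param s: str - a string to process
--     :return: str - a tab-delimited little endian hex words representation of s in rows of 4
--     """
--
--     stack = []
--     out = ''
--     words = 0
--
--     for i in range(len(s)):
--         if i > 0 and i % 4 == 0:
--             out += '0x'
--             while len(stack) > 0:
--                 out += stack.pop()
--             words += 1
--             if words == 4:
--                 out += '\n'
--                 words = 0
--             else:
--                 out += '\t'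
--         stack.append(hex(ord(s[i]))[2:])
--
--     # get last remaining bytes, if any
--     if len(stack) > 0:
--         out += '0x'
--         out += '00' * (4 - len(stack))
--         while len(stack) > 0:
--             out += stack.pop()
--
--     return out.strip()
-- ===== SOURCE B (Python) =====
-- def hexstr(s):
--     words = []
--     for a in range(0, len(s), 4):
--         chunk = s[a:a+4]
--         word = '0x' + '00' * (4 - len(chunk)) + ''.join(hex(ord(c))[2:] for c in reversed(chunk))
--         words.append(word)
--     rows = ['\t'.join(words[r:r+4]) for r in range(0, len(words), 4)]
--     return '\n'.join(rows).strip()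
-- ===== Notes on version B (the rewrite author's own statement) =====
-- stated objective: simpler
-- what changed: Replaces the char-by-char loop with a mutable stack, words counter and separator bookkeeping by a two-level chunk decomposition: slice the string into 4-char chunks, format each chunk as one little-endian hex word, then group the words into rows of 4 joined by tabs and join rows by newlines.
import Mathlib
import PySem

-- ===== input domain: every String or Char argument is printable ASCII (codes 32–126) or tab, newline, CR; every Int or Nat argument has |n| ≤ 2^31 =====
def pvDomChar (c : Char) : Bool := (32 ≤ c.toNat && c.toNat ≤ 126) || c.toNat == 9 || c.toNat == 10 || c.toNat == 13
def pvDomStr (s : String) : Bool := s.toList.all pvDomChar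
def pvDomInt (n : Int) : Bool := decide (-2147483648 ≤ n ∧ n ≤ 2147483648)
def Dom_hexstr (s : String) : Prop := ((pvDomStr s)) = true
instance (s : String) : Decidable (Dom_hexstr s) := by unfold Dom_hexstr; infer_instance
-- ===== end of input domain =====

-- B formats the string chunk-by-chunk (4-char slices → hex words → rows of 4) instead of
-- A's char-by-char loop with a stack and separator bookkeeping; objective: simpler.

-- ===== PORT A =====
-- hex(ord(c))[2:] — exact for code points < 256 (Dom admits only codes ≤ 126)
def hexDig (n : Nat) : Char := if n < 10 then Char.ofNat (48 + n) else Char.ofNat (87 + n)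
def hexOrd (c : Char) : List Char :=
  if c.toNat < 16 then [hexDig c.toNat] else [hexDig (c.toNat / 16), hexDig (c.toNat % 16)]
-- '00' * n
def zeros00 (n : Nat) : List Char := (List.replicate n ['0', '0']).flatten
-- "while len(stack) > 0: out += stack.pop()" — the while loop pops from the right end,
-- i.e. it appends the stack's elements in reverse order, written as the equivalent fold
def popAll (stack : List (List Char)) (out : List Char) : List Char :=
  stack.reverse.foldl (· ++ ·) out

-- the body of A's "for i in range(len(s))" loop, state = (stack, out, words)
def stepA (st : List (List Char) × List Char × Nat) (ic : Int × Char) :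
    List (List Char) × List Char × Nat :=
  let (stack, out, words) := st
  let (i, c) := ic
  if 0 < i ∧ i % 4 = 0 then
    let out := popAll stack (out ++ ['0', 'x'])
    let words := words + 1
    if words = 4 then ([hexOrd c], out ++ ['\n'], 0)
    else ([hexOrd c], out ++ ['\t'], words)
  else (stack ++ [hexOrd c], out, words)

-- "if len(stack) > 0: out += '0x'; out += '00'*(4-len(stack)); while …: out += stack.pop()"
def finishA (st : List (List Char) × List Char × Nat) : List Char :=
  if 0 < st.1.length then popAll st.1 (st.2.1 ++ ['0', 'x'] ++ zeros00 (4 - st.1.length))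
  else st.2.1

def hexstr (s : String) : String :=
  String.ofList (PySem.Chars.strip
    (finishA ((PySem.List.enumerate s.toList 0).foldl stepA ([], [], 0))))

-- ===== PORT B =====
-- '0x' + '00'*(4-len(chunk)) + ''.join(hex(ord(c))[2:] for c in reversed(chunk))
def wordOf (chunk : List Char) : List Char :=
  ['0', 'x'] ++ zeros00 (4 - chunk.length) ++ (chunk.reverse.map hexOrd).flatten

def hexstr_alt (s : String) : String :=
  let cs := s.toList
  let words := (PySem.List.pyRange 0 cs.length 4).map
    (fun a => wordOf (PySem.List.slice cs (some a) (some (a + 4))))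
  let rows := (PySem.List.pyRange 0 words.length 4).map
    (fun r => PySem.Chars.join ['\t'] (PySem.List.slice words (some r) (some (r + 4))))
  String.ofList (PySem.Chars.strip (PySem.Chars.join ['\n'] rows))

-- ===== PRECONDITION & SPEC =====
def Spec_hexstr (s : String) (out : String) : Prop := out = hexstr_alt s
instance (s : String) (out : String) : Decidable (Spec_hexstr s out) := by unfold Spec_hexstr; infer_instance

-- ===== CLAIM (what is proved, stated in full; the proofs are below) =====
def Claim_equal_hexstr : Prop := ∀ (s : String), Dom_hexstr s → Spec_hexstr s (hexstr s)

-- ===== LEMMAS AND PROOFS =====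

-- the list split into chunks of 4 (the last chunk may be shorter)
def chunks4 {α : Type} : List α → List (List α)
  | [] => []
  | x :: xs => ((x :: xs).take 4) :: chunks4 ((x :: xs).drop 4)
  termination_by l => l.length
  decreasing_by simp

-- A's words counter after one flush, and the separator that flush emits
def bump (w : Nat) : Nat := if w + 1 = 4 then 0 else w + 1
def sepOf (w : Nat) : List Char := if w + 1 = 4 then ['\n'] else ['\t']
-- the word a mid-loop flush emits from stack contents
def flushW (stk : List (List Char)) : List Char := ['0', 'x'] ++ stk.reverse.flatten

-- A's output from a chunk list, threading the words counter
def render : List (List Char) → Nat → List Char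
  | [], _ => []
  | [ch], _ => wordOf ch
  | ch :: ch' :: t, w => flushW (ch.map hexOrd) ++ sepOf w ++ render (ch' :: t) (bump w)

-- a word list rendered with A's separator discipline
def rsep : List (List Char) → Nat → List Char
  | [], _ => []
  | [x], _ => x
  | x :: y :: t, w => x ++ sepOf w ++ rsep (y :: t) (bump w)

theorem foldl_app (l : List (List Char)) (out : List Char) :
    l.foldl (· ++ ·) out = out ++ l.flatten := by
  induction l generalizing out with
  | nil => simp
  | cons x xs ih => simp [List.foldl_cons, ih]

theorem popAll_eq (stk : List (List Char)) (out : List Char) :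
    popAll stk out = out ++ stk.reverse.flatten := foldl_app _ _

theorem stepA_push (stk : List (List Char)) (out : List Char) (w : Nat) (i : Int) (c : Char)
    (h0 : ¬ (0 < i ∧ i % 4 = 0)) :
    stepA (stk, out, w) (i, c) = (stk ++ [hexOrd c], out, w) := by
  simp only [stepA]
  rw [if_neg h0]

theorem stepA_flush (stk : List (List Char)) (out : List Char) (w : Nat) (i : Int) (c : Char)
    (h1 : 0 < i) (h2 : i % 4 = 0) :
    stepA (stk, out, w) (i, c) = ([hexOrd c], out ++ flushW stk ++ sepOf w, bump w) := by
  simp only [stepA]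
  rw [if_pos ⟨h1, h2⟩]
  by_cases h : w + 1 = 4
  · simp [h, popAll_eq, flushW, sepOf, bump, List.append_assoc]
  · simp [h, popAll_eq, flushW, sepOf, bump, List.append_assoc]

theorem foldl_push (ch : List Char) (s : Int) (stk : List (List Char)) (out : List Char)
    (w : Nat) (h : ∀ k : Nat, k < ch.length → (s + k) % 4 ≠ 0) :
    List.foldl stepA (stk, out, w) (PySem.List.enumerate ch s) = (stk ++ ch.map hexOrd, out, w) := by
  induction ch generalizing s stk with
  | nil => simp [PySem.List.enumerate_nil]
  | cons c rest ih =>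
    rw [PySem.List.enumerate_cons, List.foldl_cons,
      stepA_push stk out w s c (by
        intro ⟨_, hm⟩; exact h 0 (by simp) (by simpa using hm))]
    rw [ih (s + 1) (stk ++ [hexOrd c]) (fun k hk => by
      have := h (k + 1) (by simpa using Nat.succ_lt_succ hk)
      intro hc; apply this; push_cast at hc ⊢; omega)]
    simp

theorem chunks4_nil {α : Type} : chunks4 ([] : List α) = [] := by rw [chunks4]

theorem chunks4_cons {α : Type} (x : α) (xs : List α) :
    chunks4 (x :: xs) = ((x :: xs).take 4) :: chunks4 ((x :: xs).drop 4) := by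
  rw [chunks4]

theorem chunks4_ne_nil {α : Type} (xs : List α) (h : xs ≠ []) : chunks4 xs ≠ [] := by
  cases xs with
  | nil => exact absurd rfl h
  | cons x t => rw [chunks4_cons]; simp

-- one chunk of ≤ 4 chars entirely in the stack, finished off by the tail flush
theorem finish_small (cs : List Char) (out : List Char) (w : Nat) (hne : cs ≠ []) :
    finishA (cs.map hexOrd, out, w) = out ++ wordOf cs := by
  have hlen : 0 < cs.length := List.length_pos_iff.mpr hne
  simp only [finishA, List.length_map, if_pos hlen, popAll_eq, wordOf]
  rw [← List.map_reverse]
  simp [List.append_assoc]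

theorem mainA (cs : List Char) (hne : cs ≠ []) :
    ∀ (m : Nat), 1 ≤ m → ∀ (stk : List (List Char)) (out : List Char) (w : Nat),
    finishA (List.foldl stepA (stk, out, w) (PySem.List.enumerate cs ((4 * m : Nat) : Int))) =
      out ++ flushW stk ++ sepOf w ++ render (chunks4 cs) (bump w) := by
  induction cs using chunks4.induct with
  | case1 => exact absurd rfl hne
  | case2 x xs ih =>
    simp only [List.drop_succ_cons] at ih
    intro m hm stk out w
    rw [PySem.List.enumerate_cons, List.foldl_cons,
        stepA_flush stk out w _ x (by positivity) (by omega)]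
    rw [show xs = xs.take 3 ++ xs.drop 3 from (List.take_append_drop 3 xs).symm,
        PySem.List.enumerate_append, List.foldl_append]
    rw [foldl_push (xs.take 3) _ _ _ _ (fun k hk => by
      have hk3 : k < 3 := lt_of_lt_of_le hk (by simp)
      have : ((4 * m : Nat) : Int) + 1 + k = 4 * (m : Int) + (1 + k) := by push_cast; ring
      rw [this]; omega)]
    by_cases hd : xs.drop 3 = []
    · -- cs fits in a single (final) chunk
      have hlen : xs.length ≤ 3 := by
        by_contra hc
        rw [List.drop_eq_nil_iff] at hd; omega
      rw [hd, PySem.List.enumerate_nil, List.foldl_nil, List.take_of_length_le hlen]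
      simp only [List.append_nil]
      rw [show [hexOrd x] ++ xs.map hexOrd = (x :: xs).map hexOrd from rfl,
        finish_small (x :: xs) _ _ (by simp)]
      rw [chunks4_cons, List.drop_eq_nil_iff.mpr (by simp; omega), chunks4_nil,
        List.take_of_length_le (by simp; omega)]
      simp [render, List.append_assoc]
    · -- at least one more chunk follows
      have hlen : 3 < xs.length := by
        by_contra hc
        rw [List.drop_eq_nil_iff] at hd; exact hd (by omega)
      rw [List.length_take_of_le (by omega),
        show ((4 * m : Nat) : Int) + 1 + (3 : Nat) = ((4 * (m + 1) : Nat) : Int) by push_cast; ring]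
      rw [ih hd (m + 1) (by omega) _ _ (bump w)]
      have hk := chunks4_ne_nil (xs.drop 3) hd
      have hdrop : (x :: xs).drop 4 = xs.drop 3 := by simp [List.drop_succ_cons]
      rw [List.take_append_drop, chunks4_cons, hdrop]
      cases hch : chunks4 (xs.drop 3) with
      | nil => exact absurd hch hk
      | cons ch t =>
        rw [show (x :: xs).take 4 = x :: xs.take 3 from rfl]
        simp only [render, flushW, List.map_cons, List.append_assoc, List.reverse_cons,
          List.flatten_append, List.flatten_cons]
        simp [List.append_assoc]

-- A's whole computation, from the initial state
theorem A_out (cs : List Char) :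
    finishA ((PySem.List.enumerate cs 0).foldl stepA ([], [], 0)) = render (chunks4 cs) 0 := by
  cases cs with
  | nil => simp [PySem.List.enumerate_nil, finishA, chunks4_nil, render]
  | cons x xs =>
    rw [PySem.List.enumerate_cons, List.foldl_cons,
        stepA_push [] [] 0 0 x (by omega)]
    rw [show xs = xs.take 3 ++ xs.drop 3 from (List.take_append_drop 3 xs).symm,
        PySem.List.enumerate_append, List.foldl_append]
    rw [foldl_push (xs.take 3) _ _ _ _ (fun k hk => by
      have hk3 : k < 3 := lt_of_lt_of_le hk (by simp)
      omega)]
    by_cases hd : xs.drop 3 = []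
    · have hlen : xs.length ≤ 3 := by
        by_contra hc
        rw [List.drop_eq_nil_iff] at hd; omega
      rw [hd, PySem.List.enumerate_nil, List.foldl_nil, List.take_of_length_le hlen]
      simp only [List.append_nil, List.nil_append]
      rw [show [hexOrd x] ++ xs.map hexOrd = (x :: xs).map hexOrd from rfl,
        finish_small (x :: xs) _ _ (by simp)]
      rw [chunks4_cons, List.drop_eq_nil_iff.mpr (by simp; omega), chunks4_nil,
        List.take_of_length_le (by simp; omega)]
      simp [render]
    · have hlen : 3 < xs.length := by
        by_contra hc
        rw [List.drop_eq_nil_iff] at hd; exact hd (by omega)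
      rw [List.length_take_of_le (by omega),
        show (0 : Int) + 1 + (3 : Nat) = ((4 * 1 : Nat) : Int) by norm_num]
      rw [mainA (xs.drop 3) hd 1 le_rfl _ _ 0]
      have hk := chunks4_ne_nil (xs.drop 3) hd
      have hdrop : (x :: xs).drop 4 = xs.drop 3 := by simp [List.drop_succ_cons]
      rw [List.take_append_drop, chunks4_cons, hdrop]
      cases hch : chunks4 (xs.drop 3) with
      | nil => exact absurd hch hk
      | cons ch t =>
        rw [show (x :: xs).take 4 = x :: xs.take 3 from rfl]
        simp only [render, flushW, List.map_cons, List.append_assoc, List.reverse_cons,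
          List.flatten_append, List.flatten_cons]
        simp [List.append_assoc]

theorem pyRange4 (n : Nat) : PySem.List.pyRange 0 (n : Int) 4 =
    (List.range ((n + 3) / 4)).map (fun k => ((4 * k : Nat) : Int)) := by
  rw [PySem.List.pyRange_of_pos 0 n (by norm_num)]
  congr 1
  · funext k; push_cast; ring
  · rcases Nat.eq_zero_or_pos n with h | h
    · subst h; simp
    · rw [if_pos (by exact_mod_cast h),
        show (n : Int) - 0 + 4 - 1 = ((n + 3 : Nat) : Int) by push_cast; ring,
        show (4 : Int) = ((4 : Nat) : Int) by norm_num, ← Int.natCast_div, Int.toNat_natCast]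

theorem range4_chunks {a b : Type} (g : List a -> b) (xs : List a) :
    (List.range ((xs.length + 3) / 4)).map (fun k => g ((xs.drop (4 * k)).take 4)) =
      (chunks4 xs).map g := by
  induction xs using chunks4.induct with
  | case1 => simp [chunks4_nil]
  | case2 x t ih =>
    simp only [List.drop_succ_cons] at ih
    simp only [List.length_drop] at ih
    rw [show ((x :: t).length + 3) / 4 = (t.length - 3 + 3) / 4 + 1 by
      simp only [List.length_cons]; omega]
    rw [List.range_succ_eq_map, List.map_cons, chunks4_cons, List.map_cons]
    simp only [List.drop_succ_cons]
    rw [List.map_map, ← ih]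
    congr 1
    apply List.map_congr_left
    intro k _
    simp only [Function.comp_apply]
    congr 2
    rw [show 4 * Nat.succ k = (4 * k + 3) + 1 from by omega, List.drop_succ_cons,
      show (4 * k + 3 : Nat) = 3 + 4 * k from by omega, ← List.drop_drop]

theorem sliceRange4 {a b : Type} (g : List a -> b) (xs : List a) :
    (PySem.List.pyRange 0 xs.length 4).map
        (fun i => g (PySem.List.slice xs (some i) (some (i + 4)))) = (chunks4 xs).map g := by
  rw [pyRange4, List.map_map, ← range4_chunks g xs]
  apply List.map_congr_left
  intro k _
  simp only [Function.comp_apply]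
  rw [show ((4 * k : Nat) : Int) + 4 = ((4 * k : Nat) : Int) + ((4 : Nat) : Int) by norm_num,
    PySem.List.slice_natCast_add]

theorem B_out (s : String) :
    hexstr_alt s = String.ofList (PySem.Chars.strip (PySem.Chars.join ['\n']
      ((chunks4 ((chunks4 s.toList).map wordOf)).map (PySem.Chars.join ['\t'])))) := by
  simp only [hexstr_alt]
  rw [sliceRange4 wordOf, sliceRange4 (PySem.Chars.join ['\t'])]

theorem render_eq_rsep (CH : List (List Char)) : ∀ (w : Nat),
    (∀ ch ∈ CH.dropLast, ch.length = 4) → render CH w = rsep (CH.map wordOf) w := by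
  induction CH with
  | nil => intro w _; simp [render, rsep]
  | cons ch t ih =>
    intro w h
    cases t with
    | nil => simp [render, rsep]
    | cons ch2 t2 =>
      have h4 : ch.length = 4 := h ch (by simp)
      show flushW (ch.map hexOrd) ++ sepOf w ++ render (ch2 :: t2) (bump w) =
        wordOf ch ++ sepOf w ++ rsep (wordOf ch2 :: t2.map wordOf) (bump w)
      rw [show wordOf ch2 :: t2.map wordOf = (ch2 :: t2).map wordOf from rfl,
        ← ih (bump w) (fun c hc => h c (by simp [List.dropLast_cons₂]; right; simpa using hc))]
      congr 1
      simp [flushW, wordOf, h4, zeros00, List.map_reverse]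

theorem rsep_split (ws : List (List Char)) : ∀ (w : Nat), w ≤ 3 → ws ≠ [] →
    rsep ws w = PySem.Chars.join ['\t'] (ws.take (4 - w)) ++
      (if ws.drop (4 - w) = [] then [] else ['\n'] ++ rsep (ws.drop (4 - w)) 0) := by
  induction ws with
  | nil => intro w _ h; exact absurd rfl h
  | cons x t ih =>
    intro w hw _
    cases t with
    | nil =>
      rw [List.take_of_length_le (by simp; omega), List.drop_eq_nil_iff.mpr (by simp; omega)]
      simp [rsep, PySem.Chars.join_singleton]
    | cons y t2 =>
      by_cases h3 : w = 3
      · subst h3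
        show x ++ sepOf 3 ++ rsep (y :: t2) (bump 3) = _
        rw [show (4 : Nat) - 3 = 1 from rfl,
          show (x :: y :: t2).take 1 = [x] from rfl,
          show (x :: y :: t2).drop 1 = y :: t2 from rfl,
          if_neg (by simp)]
        simp [sepOf, bump, PySem.Chars.join_singleton, List.append_assoc]
      · have hlt : w < 3 := by omega
        show x ++ sepOf w ++ rsep (y :: t2) (bump w) = _
        have hne4 : w + 1 ≠ 4 := by omega
        rw [show sepOf w = ['\t'] from by simp [sepOf, hne4],
          show bump w = w + 1 from by simp [bump, hne4],
          ih (w + 1) (by omega) (by simp)]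
        rw [show (4 : Nat) - w = (3 - w) + 1 by omega,
          List.take_succ_cons, List.drop_succ_cons,
          show (3 : Nat) - w = (2 - w) + 1 by omega,
          List.take_succ_cons, List.drop_succ_cons,
          show (4 : Nat) - (w + 1) = (2 - w) + 1 by omega,
          List.take_succ_cons, List.drop_succ_cons,
          PySem.Chars.join_cons_cons]
        simp [List.append_assoc]

theorem rsep_rows (ws : List (List Char)) :
    rsep ws 0 = PySem.Chars.join ['\n'] ((chunks4 ws).map (PySem.Chars.join ['\t'])) := by
  induction ws using chunks4.induct with
  | case1 => simp [rsep, chunks4_nil, PySem.Chars.join_nil]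
  | case2 x t ih =>
    simp only [List.drop_succ_cons] at ih
    rw [rsep_split (x :: t) 0 (by omega) (by simp)]
    rw [chunks4_cons, List.map_cons]
    simp only [List.drop_succ_cons, Nat.sub_zero]
    by_cases hd : t.drop 3 = []
    · rw [if_pos hd, hd, chunks4_nil]
      simp [PySem.Chars.join_singleton]
    · rw [if_neg hd, ih]
      cases hch : chunks4 (t.drop 3) with
      | nil => exact absurd hch (chunks4_ne_nil _ hd)
      | cons a l =>
        rw [List.map_cons, PySem.Chars.join_cons_cons]
        simp [List.append_assoc]

theorem chunks4_full (xs : List Char) : ∀ ch ∈ (chunks4 xs).dropLast, ch.length = 4 := by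
  induction xs using chunks4.induct with
  | case1 => simp [chunks4_nil]
  | case2 x t ih =>
    simp only [List.drop_succ_cons] at ih
    rw [chunks4_cons]
    simp only [List.drop_succ_cons]
    cases hch : chunks4 (t.drop 3) with
    | nil => simp
    | cons a l =>
      have hlen : 3 < t.length := by
        by_contra hc
        rw [show t.drop 3 = [] from List.drop_eq_nil_iff.mpr (by omega), chunks4_nil] at hch
        simp at hch
      intro ch hc
      rw [List.dropLast_cons₂] at hc
      rcases List.mem_cons.mp hc with h | h
      · subst h; simp [List.length_take]; omega
      · exact ih ch (by rw [hch]; exact h)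

theorem hexstr_spec : Claim_equal_hexstr := by
  intro s _
  show hexstr s = hexstr_alt s
  rw [B_out]
  simp only [hexstr, A_out]
  rw [render_eq_rsep _ 0 (chunks4_full s.toList), rsep_rows]
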